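-- pv_equiv track=rewrite | github.com/Hap-Hugh/postgres-explain-to-hints | psql_explain_decoder.py | start_with_tab
-- ===== SOURCE A (Python) =====
-- def start_with_tab(str, x):
--     tab_string = ""
--     for i in range(x):
--         tab_string = tab_string + "    "
--     if str.startswith(tab_string) and not str.startswith(tab_string + "    "):
--         return True
--     else:
--         return False
-- ===== SOURCE B (Python) =====
-- def start_with_tab(str, x):
--     lead = len(str) - len(str.lstrip(' '))
--     xx = max(x, 0)
--     return 4 * xx <= lead < 4 * xx + 4
-- ===== Notes on version B (the rewrite author's own statement) =====
-- stated objective: simpler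
-- what changed: Replaces building a 4*x-space prefix string in a loop and two startswith scans with one leading-space count and a closed-form integer range test 4*max(x,0) <= lead < 4*max(x,0)+4.
import Mathlib
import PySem

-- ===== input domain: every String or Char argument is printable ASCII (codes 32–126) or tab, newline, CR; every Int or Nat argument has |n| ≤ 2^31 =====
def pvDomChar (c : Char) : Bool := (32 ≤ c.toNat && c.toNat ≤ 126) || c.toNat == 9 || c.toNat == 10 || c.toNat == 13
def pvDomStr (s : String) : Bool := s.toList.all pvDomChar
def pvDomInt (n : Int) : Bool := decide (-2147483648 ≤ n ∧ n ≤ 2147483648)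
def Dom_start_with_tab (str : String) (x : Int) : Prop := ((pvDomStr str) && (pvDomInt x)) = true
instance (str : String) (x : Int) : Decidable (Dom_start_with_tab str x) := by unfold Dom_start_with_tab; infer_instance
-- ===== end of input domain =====

-- B replaces A's prefix-string construction and two startswith scans with one
-- leading-space count and a closed-form integer range test (objective: simpler).

-- ===== PORT A =====
def start_with_tab (str : String) (x : Int) : Bool :=
  let tab_string : String :=
    (PySem.List.pyRange 0 x 1).foldl (fun acc _ => acc ++ "    ") ""
  if PySem.Str.startswith str tab_string
      && !(PySem.Str.startswith str (tab_string ++ "    ")) then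
    true
  else
    false

-- ===== PORT B =====
-- str.lstrip(' ') ported by hand as dropWhile (· == ' ') on the char list (exact:
-- lstrip with an explicit single-char argument drops exactly the leading ' ' run).
def start_with_tab_alt (str : String) (x : Int) : Bool :=
  let lead : Int := (str.toList.length : Int) - ((str.toList.dropWhile (· == ' ')).length : Int)
  let xx : Int := max x 0
  decide (4 * xx ≤ lead ∧ lead < 4 * xx + 4)

-- ===== PRECONDITION & SPEC =====
def Spec_start_with_tab (str : String) (x : Int) (out : Bool) : Prop := out = start_with_tab_alt str x
instance (str : String) (x : Int) (out : Bool) : Decidable (Spec_start_with_tab str x out) := by unfold Spec_start_with_tab; infer_instance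

-- ===== CLAIM (what is proved, stated in full; the proofs are below) =====
def Claim_equal_start_with_tab : Prop := ∀ (str : String) (x : Int), Dom_start_with_tab str x → Spec_start_with_tab str x (start_with_tab str x)

-- ===== LEMMAS AND PROOFS =====

-- A's loop builds a string of 4 spaces per iteration.
theorem foldl_tab_toList (l : List Int) (s : String) :
    ((l.foldl (fun acc _ => acc ++ "    ") s).toList) = s.toList ++ List.replicate (4 * l.length) ' ' := by
  induction l generalizing s with
  | nil => simp
  | cons h t ih =>
      simp only [List.foldl_cons, ih, List.length_cons]
      rw [String.toList_append]
      have : ("    " : String).toList = List.replicate 4 ' ' := by decide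
      rw [this, List.append_assoc, ← List.replicate_add]
      ring_nf

-- replicate-space prefix ↔ leading-space count bound
theorem replicate_space_prefix_iff (k : Nat) (cs : List Char) :
    (List.replicate k ' ' <+: cs) ↔ k ≤ (cs.takeWhile (· == ' ')).length := by
  induction k generalizing cs with
  | zero => simp
  | succ n ih =>
      cases cs with
      | nil =>
          simp [List.replicate_succ]
      | cons c cs' =>
          rw [List.replicate_succ]
          constructor
          · rintro ⟨t, ht⟩
            rw [List.cons_append] at ht
            injection ht with h1 h2
            subst h1
            have : List.replicate n ' ' <+: cs' := ⟨t, h2⟩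
            have := (ih cs').mp this
            simp
            omega
          · intro h
            by_cases hc : c = ' '
            · subst hc
              simp only [List.takeWhile_cons, BEq.rfl, if_pos, List.length_cons] at h
              have hn : n ≤ (cs'.takeWhile (· == ' ')).length := by
                simp at h ⊢; omega
              obtain ⟨t, ht⟩ := (ih cs').mpr hn
              exact ⟨t, by rw [List.cons_append, ht]⟩
            · exfalso
              have : (c == ' ') = false := by simp [hc]
              simp [this] at h


theorem start_with_tab_spec : Claim_equal_start_with_tab := by
  intro str x _
  unfold Spec_start_with_tab start_with_tab start_with_tab_alt
  have hlen : (PySem.List.pyRange 0 x 1).length = x.toNat := by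
    rw [PySem.List.length_pyRange_one]; omega
  set cs := str.toList with hcs
  have hL : (cs.takeWhile (· == ' ')).length + (cs.dropWhile (· == ' ')).length = cs.length := by
    rw [← List.length_append, List.takeWhile_append_dropWhile]
  set T := (cs.takeWhile (· == ' ')).length with hT
  have hchars : ∀ m : Nat,
      PySem.Chars.startswith cs (List.replicate m ' ') = decide (m ≤ T) := by
    intro m
    by_cases hm : m ≤ T
    · simpa [hm] using (PySem.Chars.startswith_iff (s := cs) (p := List.replicate m ' ')).mpr
        ((replicate_space_prefix_iff m cs).mpr hm)
    · simp only [hm, decide_false]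
      rw [← Bool.not_eq_true]
      intro hb
      exact hm ((replicate_space_prefix_iff m cs).mp
        ((PySem.Chars.startswith_iff (s := cs) (p := List.replicate m ' ')).mp hb))
  have h1 : ((PySem.List.pyRange 0 x 1).foldl (fun acc _ => acc ++ "    ") "").toList
      = List.replicate (4 * x.toNat) ' ' := by
    rw [foldl_tab_toList, hlen]; simp
  have hrep4 : List.replicate (4 * x.toNat) ' ' ++ [' ', ' ', ' ', ' ']
      = List.replicate (4 * x.toNat + 4) ' ' := by
    rw [List.replicate_add]; rfl
  simp only [PySem.Str.startswith_eq, String.toList_append, h1,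
    show ("    " : String).toList = [' ', ' ', ' ', ' '] from rfl, hrep4, ← hcs, hchars]
  by_cases hk : 4 * x.toNat ≤ T
  · by_cases hk4 : 4 * x.toNat + 4 ≤ T
    · simp only [hk, hk4, decide_true, Bool.and_not_self]
      have : ¬ ((cs.length : Int) - ((cs.dropWhile (· == ' ')).length : Int) < 4 * max x 0 + 4) := by
        omega
      simp [this]
    · simp only [hk, hk4, decide_true, decide_false, Bool.not_false, Bool.and_true]
      have h1' : 4 * max x 0 ≤ (cs.length : Int) - ((cs.dropWhile (· == ' ')).length : Int) := by
        omega
      have h2' : (cs.length : Int) - ((cs.dropWhile (· == ' ')).length : Int) < 4 * max x 0 + 4 := by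
        omega
      simp [h1', h2']
  · simp only [hk, decide_false, Bool.false_and]
    have : ¬ (4 * max x 0 ≤ (cs.length : Int) - ((cs.dropWhile (· == ' ')).length : Int)) := by
      omega
    simp [this]
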